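-- pv_equiv track=rewrite | github.com/idealboy/CARN-pytorch | tools/script_demo.py | split_patch_pos
-- ===== SOURCE A (Python) =====
-- def split_patch_pos(height, width, N, shave, h_chop, w_chop):
--     h_step = int(height / N)
--     w_step = int(width / N)
--
--     pos_list = []
--
--     for j in range(N):
--         for i in range(N):
--
--             half_shave = int(shave / 2)
--
--             pos = [j * h_step - shave, j * h_step + h_chop, i * w_step - shave, i * w_step + w_chop]
--
--             if pos[0] > 0 and pos[2] > 0 and pos[1] < height and pos[3] < width:
--                 pos[0] = pos[0] + half_shave
--                 pos[1] = pos[1] - half_shave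
--                 pos[2] = pos[2] + half_shave
--                 pos[3] = pos[3] - half_shave
--             else:
--                 if pos[0] > 0 and pos[1] < height:
--                     pos[0] = pos[0] + half_shave
--                     pos[1] = pos[1] - half_shave
--                 else:
--                     if pos[0] <= 0:
--                         pos[0] = 0
--                         pos[1] = pos[0] + h_chop
--                     if pos[1] >= height:
--                         pos[1] = height
--                         pos[0] = pos[1] - h_chop
--
--                 if pos[2] > 0 and pos[3] < width:
--                     pos[2] = pos[2] + half_shave
--                     pos[3] = pos[3] - half_shave
--                 else:
--                     if pos[2] <= 0:
--                         pos[2] = 0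
--                         pos[3] = pos[2] + w_chop
--                     if pos[3] >= width:
--                         pos[3] = width
--                         pos[2] = pos[3] - w_chop
--
--             pos_list.append(pos)
--
--     return pos_list
-- ===== SOURCE B (Python) =====
-- def split_patch_pos(height, width, N, shave, h_chop, w_chop):
--     h_step = int(height / N)
--     w_step = int(width / N)
--     half_shave = int(shave / 2)
--
--     def span(k, step, size, chop):
--         lo = k * step - shave
--         hi = k * step + chop
--         if lo > 0 and hi < size:
--             return [lo + half_shave, hi - half_shave]
--         if lo <= 0:
--             lo, hi = 0, chop
--         if hi >= size:
--             hi, lo = size, size - chop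
--         return [lo, hi]
--
--     rows = [span(j, h_step, height, h_chop) for j in range(N)]
--     cols = [span(i, w_step, width, w_chop) for i in range(N)]
--     return [r + c for r in rows for c in cols]
-- ===== Notes on version B (the rewrite author's own statement) =====
-- stated objective: alternative
-- what changed: Hoists the per-dimension clamp/shave logic into one helper run once per row and once per column (two 1-D tables of N entries each), then combines them with a product comprehension, instead of redoing all four-coordinate branch logic in the N*N inner loop; the redundant 'all four in bounds' branch is dropped since it equals the conjunction of the two per-dimension branches.
import Mathlib
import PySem

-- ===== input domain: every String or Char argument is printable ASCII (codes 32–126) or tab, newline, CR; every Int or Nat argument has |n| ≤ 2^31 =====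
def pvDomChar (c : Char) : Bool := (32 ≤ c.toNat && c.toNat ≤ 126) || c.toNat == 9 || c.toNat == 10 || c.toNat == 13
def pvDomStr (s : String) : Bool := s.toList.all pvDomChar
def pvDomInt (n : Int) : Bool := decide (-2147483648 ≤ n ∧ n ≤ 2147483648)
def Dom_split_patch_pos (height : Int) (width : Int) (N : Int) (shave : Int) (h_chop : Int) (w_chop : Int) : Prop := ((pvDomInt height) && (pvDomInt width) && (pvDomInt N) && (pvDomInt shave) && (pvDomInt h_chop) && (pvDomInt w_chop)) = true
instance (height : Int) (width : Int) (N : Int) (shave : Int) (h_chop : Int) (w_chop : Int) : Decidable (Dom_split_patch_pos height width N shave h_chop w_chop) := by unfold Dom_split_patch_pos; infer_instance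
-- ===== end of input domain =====

-- B hoists the per-dimension clamp/shave logic out of the N×N inner loop into two 1-D tables
-- (one per row, one per column) built once, then combines them with a product comprehension.

-- ===== PORT A =====
-- int(x / y) is float true division truncated toward zero; on |·| ≤ 2^31 (Dom) it equals
-- exact truncated division, PySem.Int.truncdiv.
def split_patch_pos (height : Int) (width : Int) (N : Int) (shave : Int) (h_chop : Int) (w_chop : Int) : List (List Int) :=
  let h_step := PySem.Int.truncdiv height N
  let w_step := PySem.Int.truncdiv width N
  (PySem.List.pyRange 0 N 1).foldl (fun pos_list j =>
    (PySem.List.pyRange 0 N 1).foldl (fun pos_list i =>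
      let half_shave := PySem.Int.truncdiv shave 2
      let p0 := j * h_step - shave
      let p1 := j * h_step + h_chop
      let p2 := i * w_step - shave
      let p3 := i * w_step + w_chop
      let pos : List Int :=
        if p0 > 0 ∧ p2 > 0 ∧ p1 < height ∧ p3 < width then
          [p0 + half_shave, p1 - half_shave, p2 + half_shave, p3 - half_shave]
        else
          -- height dimension: the second clamp test reads the just-updated pos[1]
          let hq : Int × Int :=
            if p0 > 0 ∧ p1 < height then (p0 + half_shave, p1 - half_shave)
            else
              let r : Int × Int := if p0 ≤ 0 then ((0 : Int), (0 : Int) + h_chop) else (p0, p1)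
              if r.2 ≥ height then (height - h_chop, height) else r
          -- width dimension, symmetric
          let wq : Int × Int :=
            if p2 > 0 ∧ p3 < width then (p2 + half_shave, p3 - half_shave)
            else
              let r : Int × Int := if p2 ≤ 0 then ((0 : Int), (0 : Int) + w_chop) else (p2, p3)
              if r.2 ≥ width then (width - w_chop, width) else r
          [hq.1, hq.2, wq.1, wq.2]
      pos_list ++ [pos]) pos_list) []

-- ===== PORT B =====
-- Source B's helper span(k, step, size, chop) (closes over shave and half_shave)
def pvSpan (shave : Int) (half_shave : Int) (k : Int) (step : Int) (size : Int) (chop : Int) : List Int :=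
  let lo := k * step - shave
  let hi := k * step + chop
  if lo > 0 ∧ hi < size then [lo + half_shave, hi - half_shave]
  else
    let q : Int × Int := if lo ≤ 0 then ((0 : Int), chop) else (lo, hi)
    let q' : Int × Int := if q.2 ≥ size then (size - chop, size) else q
    [q'.1, q'.2]

def split_patch_pos_alt (height : Int) (width : Int) (N : Int) (shave : Int) (h_chop : Int) (w_chop : Int) : List (List Int) :=
  let h_step := PySem.Int.truncdiv height N
  let w_step := PySem.Int.truncdiv width N
  let half_shave := PySem.Int.truncdiv shave 2
  let rows := (PySem.List.pyRange 0 N 1).map (fun j => pvSpan shave half_shave j h_step height h_chop)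
  let cols := (PySem.List.pyRange 0 N 1).map (fun i => pvSpan shave half_shave i w_step width w_chop)
  rows.flatMap (fun r => cols.map (fun c => r ++ c))

-- ===== PRECONDITION & SPEC =====
-- Pre_ excludes only N = 0, on which Python A raises ZeroDivisionError in int(height / N).
def Pre_split_patch_pos (height : Int) (width : Int) (N : Int) (shave : Int) (h_chop : Int) (w_chop : Int) : Prop := N ≠ 0
instance (height : Int) (width : Int) (N : Int) (shave : Int) (h_chop : Int) (w_chop : Int) : Decidable (Pre_split_patch_pos height width N shave h_chop w_chop) := by unfold Pre_split_patch_pos; infer_instance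

def pvWitness_split_patch_pos : Int × Int × Int × Int × Int × Int := (10, 10, 2, 2, 6, 6)

def Spec_split_patch_pos (height : Int) (width : Int) (N : Int) (shave : Int) (h_chop : Int) (w_chop : Int) (out : List (List Int)) : Prop := out = split_patch_pos_alt height width N shave h_chop w_chop
instance (height : Int) (width : Int) (N : Int) (shave : Int) (h_chop : Int) (w_chop : Int) (out : List (List Int)) : Decidable (Spec_split_patch_pos height width N shave h_chop w_chop out) := by unfold Spec_split_patch_pos; infer_instance

-- ===== CLAIM (what is proved, stated in full; the proofs are below) =====
def Claim_equal_split_patch_pos : Prop := ∀ (height : Int) (width : Int) (N : Int) (shave : Int) (h_chop : Int) (w_chop : Int), Dom_split_patch_pos height width N shave h_chop w_chop → Pre_split_patch_pos height width N shave h_chop w_chop → Spec_split_patch_pos height width N shave h_chop w_chop (split_patch_pos height width N shave h_chop w_chop)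

-- ===== LEMMAS AND PROOFS =====

-- ===== VERDICT (by name: the statement is the Claim_ definition above) =====
theorem split_patch_pos_spec : Claim_equal_split_patch_pos := by
  intro height width N shave h_chop w_chop _ _
  unfold Spec_split_patch_pos split_patch_pos split_patch_pos_alt
  simp only [PySem.List.foldl_append_singleton_eq_map, PySem.List.foldl_append_eq_flatMap,
    List.nil_append, List.flatMap_map, List.map_map]
  congr 1
  funext j
  congr 1
  funext i
  simp only [Function.comp_apply, pvSpan]
  generalize j * PySem.Int.truncdiv height N = a
  generalize i * PySem.Int.truncdiv width N = b
  split_ifs <;> simp_all
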